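-- pv_equiv track=rewrite | github.com/emplam27/Python-Algorithm | 프로그래머스/카카오 2020/가사검색.py | check_query
-- ===== SOURCE A (Python) =====
-- def check_query(query, words_arr):
--     # 성립하기 시작하는 인덱스 찾기
--     start, end = 0, len(words_arr) - 1
--     while start <= end:
--         mid = (start + end) // 2
--         if words_arr[mid] < query:  # query가 더 크면
--             start = mid + 1
--         else:  # query가 더 작으면
--             end = mid - 1
--     start_index = start
--
--     # 성립이 끝나는 인덱스 찾기
--     # ?를 빼준 후, word를 같은 길이로 만들어 비교
--     query = query.rstrip('?')
--     l = len(query)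
--     end = len(words_arr) - 1  # start 그대로 사용
--     while start <= end:
--         mid = (start + end) // 2
--         if words_arr[mid][:l] == query:
--             start = mid + 1
--         else:
--             end = mid - 1
--     end_index = start
--
--     return end_index - start_index
-- ===== SOURCE B (Python) =====
-- def check_query(query, words_arr):
--     p = query.rstrip('?')
--     l = len(p)
--     return sum(1 for w in words_arr if w >= query and w[:l] == p)
-- ===== Notes on version B (the rewrite author's own statement) =====
-- stated objective: simpler
-- what changed: Replaces A's two in-place binary searches (lower bound of 'word < query', then end of the stripped-prefix block) by one linear pass that counts words w with w >= query and w[:len(p)] == p for p = query.rstrip('?'); Pre_ admits exactly the lists satisfying the two bisection invariants A assumes of its sorted input (every sorted list qualifies) and excludes the rest, where A's value depends on the probe path and matches no specification.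
-- outside the precondition, e.g. on check_query('a', ['b', 'a']): A returns 0, B returns 1
import Mathlib
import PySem

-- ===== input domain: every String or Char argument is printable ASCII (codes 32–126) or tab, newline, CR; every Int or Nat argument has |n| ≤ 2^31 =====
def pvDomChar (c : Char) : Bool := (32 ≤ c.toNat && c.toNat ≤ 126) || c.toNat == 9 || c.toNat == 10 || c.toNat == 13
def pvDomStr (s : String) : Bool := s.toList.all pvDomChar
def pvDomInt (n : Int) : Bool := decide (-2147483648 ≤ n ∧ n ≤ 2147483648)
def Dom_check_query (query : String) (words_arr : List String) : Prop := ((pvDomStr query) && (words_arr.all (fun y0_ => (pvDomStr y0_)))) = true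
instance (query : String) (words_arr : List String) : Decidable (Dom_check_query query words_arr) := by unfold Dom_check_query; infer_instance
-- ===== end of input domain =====

-- B replaces A's two in-place binary searches by one linear counting pass (same result on sorted input, which Pre_ states).


-- ===== PORT A =====
-- s.rstrip('?') ported by hand (PySem has no rstrip-with-chars): drop exactly the trailing '?' characters — exact.
def pyRstripQm (s : String) : String := String.ofList ((s.toList.reverse.dropWhile (· == '?')).reverse)

-- one 'while start <= end' binary-search loop of A; C is the branch condition on words_arr[mid].
-- The 'none' arm is where Python would raise IndexError; it is unreachable for A's calls (0 ≤ start, e ≤ len-1 throughout).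
def pvBSLoop (arr : List String) (C : String → Bool) (start e : Int) : Int :=
  if h : start ≤ e then
    let mid := PySem.Int.floordiv (start + e) 2
    match PySem.List.pyGet? arr mid with
    | some w => if C w then pvBSLoop arr C (mid + 1) e else pvBSLoop arr C start (mid - 1)
    | none => start
  else start
termination_by (e + 1 - start).toNat
decreasing_by
  all_goals (have hb := PySem.Int.floordiv_two_mid_bounds h; omega)

def check_query (query : String) (words_arr : List String) : Int :=
  let start_index := pvBSLoop words_arr (fun w => decide (w < query)) 0 ((words_arr.length : Int) - 1)
  let q := pyRstripQm query
  let l : Int := PySem.Str.len q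
  let end_index := pvBSLoop words_arr (fun w => decide (PySem.Str.slice w none (some l) = q)) start_index ((words_arr.length : Int) - 1)
  end_index - start_index

-- ===== PORT B =====
def check_query_alt (query : String) (words_arr : List String) : Int :=
  let p := pyRstripQm query
  let l : Int := PySem.Str.len p
  ((words_arr.countP (fun w => decide (query ≤ w) && decide (PySem.Str.slice w none (some l) = p)) : Nat) : Int)

-- ===== PRECONDITION & SPEC =====
-- Pre_ excludes word lists violating the two bisection invariants A assumes of its (sorted) input: words below the
-- query must precede the rest, and among words ≥ query the ones carrying the stripped-query prefix must come first
-- (every sorted list satisfies both); on other lists A's value depends on the probe path and matches no specification.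
def Pre_check_query (query : String) (words_arr : List String) : Prop :=
  List.Pairwise (fun a b =>
    (b.toList < query.toList → a.toList < query.toList) ∧
    (query.toList ≤ a.toList →
      (query.toList.reverse.dropWhile (· == '?')).reverse <+: b.toList →
      (query.toList.reverse.dropWhile (· == '?')).reverse <+: a.toList)) words_arr
instance (query : String) (words_arr : List String) : Decidable (Pre_check_query query words_arr) := by unfold Pre_check_query; infer_instance
def pvWitness_check_query : String × List String := ("ab?", ["aa", "ab", "abc", "b"])

def Spec_check_query (query : String) (words_arr : List String) (out : Int) : Prop := out = check_query_alt query words_arr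
instance (query : String) (words_arr : List String) (out : Int) : Decidable (Spec_check_query query words_arr out) := by unfold Spec_check_query; infer_instance

-- ===== CLAIM (what is proved, stated in full; the proofs are below) =====
def Claim_equal_check_query : Prop := ∀ (query : String) (words_arr : List String), Dom_check_query query words_arr → Pre_check_query query words_arr → Spec_check_query query words_arr (check_query query words_arr)

-- ===== LEMMAS AND PROOFS =====

-- the element just past takeWhile fails the predicate
theorem pv_getElem_len_takeWhile {α : Type} (P : α → Bool) (l : List α)
    (h : (l.takeWhile P).length < l.length) : P (l[(l.takeWhile P).length]) = false := by
  have hne : l.dropWhile P ≠ [] := by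
    intro he
    have h2 := List.takeWhile_append_dropWhile (p := P) (l := l)
    rw [he, List.append_nil] at h2
    rw [h2] at h; omega
  obtain ⟨t, ht⟩ : ∃ t, (l.takeWhile P).length = t := ⟨_, rfl⟩
  have h4 : l[t]? = some ((l.dropWhile P).head hne) := by
    conv_lhs => rw [← List.takeWhile_append_dropWhile (p := P) (l := l)]
    rw [List.getElem?_append_right (by omega)]
    rw [ht, Nat.sub_self]
    rw [← List.head?_eq_getElem?, List.head?_eq_some_head hne]
  have h6 : l[t]? = some (l[(l.takeWhile P).length]) := by
    rw [List.getElem?_eq_getElem (l := l) (i := t) (by omega)]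
    congr 1; congr 1; omega
  rw [h6] at h4
  rw [Option.some.inj h4]
  exact List.head_dropWhile_not P hne

-- a downward-closed predicate holds exactly on the takeWhile prefix
theorem pv_takeWhile_iff {α : Type} (P : α → Bool) (l : List α)
    (hdc : ∀ i j (hj : j < l.length) (hij : i ≤ j), P (l[j]) = true → P (l[i]'(by omega)) = true) :
    ∀ i (hi : i < l.length), (P l[i] = true ↔ i < (l.takeWhile P).length) := by
  intro i hi
  have hlen : (l.takeWhile P).length ≤ l.length := (List.takeWhile_prefix P).length_le
  constructor
  · intro hP
    by_contra hlt
    push_neg at hlt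
    have ht : (l.takeWhile P).length < l.length := by omega
    have := hdc (l.takeWhile P).length i hi hlt hP
    rw [pv_getElem_len_takeWhile P l ht] at this
    exact Bool.false_ne_true this
  · intro hlt
    have hg : l[i] = (l.takeWhile P)[i]'(by omega) := ((List.takeWhile_prefix P).getElem hlt).symm
    rw [hg]
    exact List.mem_takeWhile_imp (List.getElem_mem _)

-- the binary-search loop returns the cut point of a predicate that holds exactly below the cut
theorem pvBSLoop_eq (arr : List String) (C : String → Bool) (cut : Int) :
    ∀ (n : Nat) (start e : Int), (e + 1 - start).toNat = n → 0 ≤ start → e ≤ (arr.length : Int) - 1 →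
    start ≤ cut → cut ≤ e + 1 →
    (∀ i : Nat, (hi : i < arr.length) → start ≤ (i : Int) → (i : Int) ≤ e → (C arr[i] = true ↔ (i : Int) < cut)) →
    pvBSLoop arr C start e = cut := by
  intro n
  induction n using Nat.strong_induction_on with
  | _ n ih =>
    intro start e hn h0 he hsc hce hC
    rw [pvBSLoop]
    by_cases h : start ≤ e
    · simp only [h, dif_pos]
      obtain ⟨hb1, hb2⟩ := PySem.Int.floordiv_two_mid_bounds h
      set mid := PySem.Int.floordiv (start + e) 2 with hmid
      have hmnn : 0 ≤ mid := le_trans h0 hb1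
      have hmlt : mid < (arr.length : Int) := by omega
      obtain ⟨m, hm⟩ : ∃ m : Nat, (m : Int) = mid := ⟨mid.toNat, Int.toNat_of_nonneg hmnn⟩
      have hmlen : m < arr.length := by exact_mod_cast hm ▸ hmlt
      have hget : PySem.List.pyGet? arr mid = some (arr[m]) := by
        rw [← hm, PySem.List.pyGet?_natCast, List.getElem?_eq_getElem hmlen]
      rw [hget]
      show (if C arr[m] = true then pvBSLoop arr C (mid + 1) e else pvBSLoop arr C start (mid - 1)) = cut
      by_cases hc : C arr[m] = true
      · rw [if_pos hc]
        have hcut : (m : Int) < cut := (hC m hmlen (hm ▸ hb1) (hm ▸ hb2)).mp hc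
        exact ih (e + 1 - (mid + 1)).toNat (by omega) (mid + 1) e rfl (by omega) he (by omega) hce
          (fun i hi h1 h2 => hC i hi (by omega) h2)
      · rw [if_neg hc]
        have hcut : cut ≤ (m : Int) := by
          by_contra hlt
          push_neg at hlt
          exact hc ((hC m hmlen (hm ▸ hb1) (hm ▸ hb2)).mpr hlt)
        exact ih ((mid - 1) + 1 - start).toNat (by omega) start (mid - 1) rfl h0 (by omega) hsc (by omega)
          (fun i hi h1 h2 => hC i hi h1 (by omega))
    · rw [dif_neg h]
      omega

-- countP of a predicate that holds exactly below k
theorem pv_countP_eq {α : Type} (P : α → Bool) :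
    ∀ (l : List α) (k : Nat), k ≤ l.length →
    (∀ i (hi : i < l.length), (P l[i] = true ↔ i < k)) → l.countP P = k := by
  intro l
  induction l with
  | nil =>
    intro k hk _
    simp only [List.length_nil, Nat.le_zero] at hk
    simp [hk]
  | cons x xs ihl =>
    intro k hk h
    cases k with
    | zero =>
      rw [List.countP_eq_zero.mpr]
      intro a ha
      obtain ⟨i, hi, rfl⟩ := List.getElem_of_mem ha
      simpa using (h i hi)
    | succ k' =>
      have hx : P x = true := (h 0 (by simp)).mpr (by omega)
      rw [List.countP_cons, hx]
      have := ihl k' (by simpa using hk) (fun i hi => by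
        have := h (i + 1) (by simpa using hi)
        simpa [Nat.succ_lt_succ_iff] using this)
      simp [this]
  
-- the second branch condition is the prefix test
theorem pv_slice_eq_iff_prefix (w p : String) :
    (PySem.Str.slice w none (some (PySem.Str.len p)) = p) ↔ p.toList <+: w.toList := by
  rw [← String.toList_inj, PySem.Str.toList_slice, PySem.Chars.slice_eq_listSlice,
    PySem.Str.len_eq, PySem.List.slice_to _ (by positivity), Int.toNat_natCast]
  rw [List.prefix_iff_eq_take]
  exact ⟨fun h => h.symm, fun h => h.symm⟩

-- ===== VERDICT (by name: the statement is the Claim_ definition above) =====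
theorem check_query_spec : Claim_equal_check_query := by
  intro q arr _ hpre
  show check_query q arr = check_query_alt q arr
  have hpair := List.pairwise_iff_getElem.mp hpre
  have hP1dc : ∀ i j (hj : j < arr.length) (hij : i ≤ j),
      (fun w => decide (w < q)) (arr[j]) = true →
      (fun w => decide (w < q)) (arr[i]'(by omega)) = true := by
    intro i j hj hij hPj
    simp only [decide_eq_true_iff] at hPj ⊢
    rcases Nat.lt_or_ge i j with h | h
    · exact String.lt_iff_toList_lt.mpr
        ((hpair i j (by omega) hj h).1 (String.lt_iff_toList_lt.mp hPj))
    · have hij' : i = j := by omega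
      subst hij'; exact hPj
  have char1 := pv_takeWhile_iff (fun w => decide (w < q)) arr hP1dc
  set t0 := (arr.takeWhile (fun w => decide (w < q))).length with ht0
  have ht0le : t0 ≤ arr.length := (List.takeWhile_prefix _).length_le
  -- loop 1
  have loop1 : pvBSLoop arr (fun w => decide (w < q)) 0 ((arr.length : Int) - 1) = (t0 : Int) := by
    apply pvBSLoop_eq arr _ _ ((arr.length : Int) - 1 + 1 - 0).toNat 0 _ rfl le_rfl le_rfl
      (by omega) (by omega)
    intro i hi _ _
    rw [char1 i hi]
    omega
  -- the p-prefix characterisation of the second condition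
  set p := pyRstripQm q with hp
  set P2 : String → Bool := fun w => decide (PySem.Str.slice w none (some (PySem.Str.len p)) = p) with hP2
  have hplist : p.toList = (q.toList.reverse.dropWhile (· == '?')).reverse := by
    rw [hp]; simp [pyRstripQm]
  have hP2iff : ∀ w : String, P2 w = true ↔ p.toList <+: w.toList := by
    intro w
    rw [hP2]
    simp only [decide_eq_true_iff]
    exact pv_slice_eq_iff_prefix w p
  have hge : ∀ i (hi : i < arr.length), t0 ≤ i → q ≤ arr[i] := by
    intro i hi hti
    by_contra hqi
    push_neg at hqi
    have hP : (fun w => decide (w < q)) (arr[i]) = true := by simpa using hqi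
    have := (char1 i hi).mp hP
    omega
  -- downward closedness of P2 on the tail
  have hdc2 : ∀ i j (hj : j < (arr.drop t0).length) (hij : i ≤ j),
      P2 ((arr.drop t0)[j]) = true → P2 ((arr.drop t0)[i]'(by omega)) = true := by
    intro i j hj hij hPj
    rw [hP2iff] at hPj ⊢
    rw [List.getElem_drop] at hPj ⊢
    have hd : (arr.drop t0).length = arr.length - t0 := List.length_drop
    have hjlen : t0 + j < arr.length := by omega
    have hilen : t0 + i < arr.length := by omega
    rcases Nat.lt_or_ge i j with h | h
    · have hqw : q.toList ≤ arr[t0 + i].toList :=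
        String.le_iff_toList_le.mp (hge (t0 + i) hilen (by omega))
      have hc2 := (hpair (t0 + i) (t0 + j) hilen hjlen (by omega)).2 hqw
      rw [← hplist] at hc2
      exact hc2 hPj
    · have hij' : i = j := by omega
      subst hij'; exact hPj
  have char2 := pv_takeWhile_iff P2 (arr.drop t0) hdc2
  set t1 := ((arr.drop t0).takeWhile P2).length with ht1
  have ht1le : t1 ≤ (arr.drop t0).length := (List.takeWhile_prefix _).length_le
  have hdrople : (arr.drop t0).length = arr.length - t0 := List.length_drop
  -- loop 2
  have loop2 : pvBSLoop arr P2 (t0 : Int) ((arr.length : Int) - 1) = (t0 : Int) + (t1 : Int) := by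
    apply pvBSLoop_eq arr _ _ (((arr.length : Int) - 1) + 1 - t0).toNat _ _ rfl
      (by omega) le_rfl (by omega) (by omega)
    intro i hi h1 h2
    have hsub : i - t0 < (arr.drop t0).length := by omega
    have hidx : arr[i] = (arr.drop t0)[i - t0]'hsub := by
      rw [List.getElem_drop]
      congr 1
      omega
    rw [hidx, char2 (i - t0) hsub]
    omega
  -- evaluate port A
  have hA : check_query q arr = (t0 : Int) + (t1 : Int) - (t0 : Int) := by
    show pvBSLoop arr _ (pvBSLoop arr (fun w => decide (w < q)) 0 ((arr.length : Int) - 1)) ((arr.length : Int) - 1) -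
      pvBSLoop arr (fun w => decide (w < q)) 0 ((arr.length : Int) - 1) = _
    rw [loop1]
    rw [← hp, ← hP2]
    rw [loop2]
  -- evaluate port B
  have hB : check_query_alt q arr = (t1 : Int) := by
    show ((arr.countP (fun w => decide (q ≤ w) && P2 w) : Nat) : Int) = (t1 : Int)
    congr 1
    conv_lhs => rw [← List.take_append_drop t0 arr]
    rw [List.countP_append]
    have hzero : (arr.take t0).countP (fun w => decide (q ≤ w) && P2 w) = 0 := by
      rw [List.countP_eq_zero]
      intro a ha
      obtain ⟨i, hi, rfl⟩ := List.getElem_of_mem ha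
      have hit : i < t0 := by
        have h2 : i < min t0 arr.length := by simpa using hi
        omega
      have hia : i < arr.length := by omega
      have hgt : (arr.take t0)[i] = arr[i]'hia := List.getElem_take
      rw [hgt]
      have hlt : arr[i] < q := by
        have := (char1 i hia).mpr hit
        simpa using this
      simp [not_le.mpr hlt]
    rw [hzero, Nat.zero_add]
    have hcongr : (arr.drop t0).countP (fun w => decide (q ≤ w) && P2 w) = (arr.drop t0).countP P2 := by
      apply List.countP_congr
      intro x hx
      obtain ⟨i, hi, rfl⟩ := List.getElem_of_mem hx
      have hilen : t0 + i < arr.length := by omega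
      have hq : q ≤ (arr.drop t0)[i] := by
        rw [List.getElem_drop]
        exact hge (t0 + i) hilen (by omega)
      rw [decide_eq_true hq, Bool.true_and]
    rw [hcongr]
    exact pv_countP_eq P2 (arr.drop t0) t1 ht1le char2
  rw [hA, hB]
  omega
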